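-- pv_equiv track=rewrite | github.com/pypi-data/pypi-mirror-367 | packages/a3/a3-0.4.14-py3-none-any.whl/a3/core/code_syntax_fixer.py | _fix_incomplete_blocks
-- ===== SOURCE A (Python) =====
-- def _fix_incomplete_blocks(content: str) -> str:
--     """Fix incomplete code blocks (if, for, while, try, etc.) by adding missing content."""
--     lines = content.split('\n')
--     fixed_lines = []
--     i = 0
--
--     while i < len(lines):
--         line = lines[i]
--         stripped = line.strip()
--
--         # Check for blocks that require indented content
--         if (stripped.endswith(':') and
--             (stripped.startswith('if ') or stripped.startswith('elif ') or
--              stripped.startswith('else:') or stripped.startswith('for ') or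
--              stripped.startswith('while ') or stripped.startswith('try:') or
--              stripped.startswith('def ') or stripped.startswith('class ') or
--              stripped.startswith('with ') or stripped.startswith('except') or
--              stripped.startswith('finally:'))):
--
--             fixed_lines.append(line)
--             block_indent = len(line) - len(line.lstrip())
--             i += 1
--
--             # Check if there's properly indented content following
--             has_content = False
--
--             # Look ahead to see if there's indented content
--             j = i
--             while j < len(lines):
--                 next_line = lines[j]
--                 next_stripped = next_line.strip()
--
--                 # Skip empty lines
--                 if not next_stripped:
--                     j += 1
--                     continue
--
--                 next_indent = len(next_line) - len(next_line.lstrip())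
--
--                 # If we find properly indented content, we're good
--                 if next_indent > block_indent:
--                     has_content = True
--                     break
--
--                 # If we find content at same or lower level, block is incomplete
--                 elif next_indent <= block_indent:
--                     break
--
--                 j += 1
--
--             # If no indented content found, add appropriate content
--             if not has_content:
--                 if stripped.startswith('try:'):
--                     # For try blocks, add except
--                     fixed_lines.append(' ' * (block_indent + 4) + 'pass')
--                     fixed_lines.append(' ' * block_indent + 'except Exception as e:')
--                     fixed_lines.append(' ' * (block_indent + 4) + 'pass')
--                 elif stripped.startswith('except') or stripped.startswith('finally:'):
--                     # For except/finally blocks, just add pass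
--                     fixed_lines.append(' ' * (block_indent + 4) + 'pass')
--                 elif (stripped.startswith('if ') or stripped.startswith('elif ') or
--                       stripped.startswith('else:') or stripped.startswith('for ') or
--                       stripped.startswith('while ') or stripped.startswith('with ')):
--                     # For control flow blocks, add pass
--                     fixed_lines.append(' ' * (block_indent + 4) + 'pass')
--                 elif stripped.startswith('def ') or stripped.startswith('class '):
--                     # For function/class definitions, add pass
--                     fixed_lines.append(' ' * (block_indent + 4) + 'pass')
--                 else:
--                     # Generic case, add pass
--                     fixed_lines.append(' ' * (block_indent + 4) + 'pass')
--
--             # Continue processing from where we left off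
--             continue
--         else:
--             fixed_lines.append(line)
--
--         i += 1
--
--     return '\n'.join(fixed_lines)
-- ===== SOURCE B (Python) =====
-- # B: one backward pass maintaining the indent of the nearest later non-blank line,
-- # instead of A's forward scan with an inner lookahead loop per header line.
--
-- _PREFIXES = ('if ', 'elif ', 'else:', 'for ', 'while ', 'try:',
--              'def ', 'class ', 'with ', 'except', 'finally:')
--
--
-- def _is_header(stripped: str) -> bool:
--     return stripped.endswith(':') and stripped.startswith(_PREFIXES)
--
--
-- def _indent(line: str) -> int:
--     return len(line) - len(line.lstrip())
--
--
-- def _has_content(next_indent, block_indent: int) -> bool: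
--     return next_indent is not None and next_indent > block_indent
--
--
-- def _fix_incomplete_blocks(content: str) -> str:
--     out = []  # reversed output, built back-to-front
--     next_indent = None  # indent of nearest later non-blank line
--     for line in reversed(content.split('\n')):
--         stripped = line.strip()
--         if _is_header(stripped):
--             block_indent = _indent(line)
--             if not _has_content(next_indent, block_indent):
--                 if stripped.startswith('try:'):
--                     # final order: pass / except Exception as e: / pass
--                     out.append(' ' * (block_indent + 4) + 'pass')
--                     out.append(' ' * block_indent + 'except Exception as e:')
--                     out.append(' ' * (block_indent + 4) + 'pass')
--                 else:
--                     out.append(' ' * (block_indent + 4) + 'pass')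
--         if stripped:
--             next_indent = _indent(line)
--         out.append(line)
--     return '\n'.join(reversed(out))
-- ===== Notes on version B (the rewrite author's own statement) =====
-- stated objective: alternative
-- what changed: Replaces A's forward scan with a per-header inner lookahead loop by a single backward pass over the lines that carries the indent of the nearest later non-blank line, building the output back-to-front.
import Mathlib
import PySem

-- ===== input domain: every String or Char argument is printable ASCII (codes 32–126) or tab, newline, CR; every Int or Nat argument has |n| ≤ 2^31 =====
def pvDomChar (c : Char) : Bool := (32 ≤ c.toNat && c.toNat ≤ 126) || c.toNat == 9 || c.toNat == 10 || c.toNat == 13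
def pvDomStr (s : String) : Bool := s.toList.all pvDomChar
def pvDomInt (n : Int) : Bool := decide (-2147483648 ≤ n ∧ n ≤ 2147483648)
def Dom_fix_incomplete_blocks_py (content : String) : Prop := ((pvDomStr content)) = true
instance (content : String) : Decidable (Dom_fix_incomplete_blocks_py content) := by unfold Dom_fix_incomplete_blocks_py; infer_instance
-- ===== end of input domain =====

-- B replaces A's forward scan with an inner per-header lookahead loop by one backward pass
-- carrying the indent of the nearest later non-blank line (objective: alternative decomposition).

-- ===== PORT A =====

-- ' ' * n
def pvSp (n : Int) : String := String.ofList (PySem.List.pyRepeat [' '] n)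

-- the inner 'look ahead' while-loop of A: j scans rest, skipping blanks
def pvLookA (bi : Int) : List String → Bool
  | [] => false
  | l :: rest =>
    let s := PySem.Str.strip l
    if s = "" then pvLookA bi rest
    else
      let ni := PySem.Str.len l - PySem.Str.len (PySem.Str.lstrip l)
      if ni > bi then true else false

-- the outer while-loop of A, recursing on the remaining lines
def pvFixA : List String → List String
  | [] => []
  | line :: rest =>
    let stripped := PySem.Str.strip line
    if PySem.Str.endswith stripped ":" &&
       (PySem.Str.startswith stripped "if " || PySem.Str.startswith stripped "elif " ||
        PySem.Str.startswith stripped "else:" || PySem.Str.startswith stripped "for " ||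
        PySem.Str.startswith stripped "while " || PySem.Str.startswith stripped "try:" ||
        PySem.Str.startswith stripped "def " || PySem.Str.startswith stripped "class " ||
        PySem.Str.startswith stripped "with " || PySem.Str.startswith stripped "except" ||
        PySem.Str.startswith stripped "finally:") then
      let block_indent := PySem.Str.len line - PySem.Str.len (PySem.Str.lstrip line)
      let has_content := pvLookA block_indent rest
      (line ::
        (if !has_content then
          (if PySem.Str.startswith stripped "try:" then
            [pvSp (block_indent + 4) ++ "pass", pvSp block_indent ++ "except Exception as e:",
             pvSp (block_indent + 4) ++ "pass"]
          else if PySem.Str.startswith stripped "except" || PySem.Str.startswith stripped "finally:" then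
            [pvSp (block_indent + 4) ++ "pass"]
          else if PySem.Str.startswith stripped "if " || PySem.Str.startswith stripped "elif " ||
                  PySem.Str.startswith stripped "else:" || PySem.Str.startswith stripped "for " ||
                  PySem.Str.startswith stripped "while " || PySem.Str.startswith stripped "with " then
            [pvSp (block_indent + 4) ++ "pass"]
          else if PySem.Str.startswith stripped "def " || PySem.Str.startswith stripped "class " then
            [pvSp (block_indent + 4) ++ "pass"]
          else
            [pvSp (block_indent + 4) ++ "pass"])
        else [])) ++ pvFixA rest
    else
      line :: pvFixA rest

def fix_incomplete_blocks_py (content : String) : String :=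
  PySem.Str.join "\n" (pvFixA ((PySem.Str.split? content "\n").getD []))

-- ===== PORT B =====

def pvIsHeader (s : String) : Bool :=
  PySem.Str.endswith s ":" &&
  (PySem.Str.startswith s "if " || PySem.Str.startswith s "elif " ||
   PySem.Str.startswith s "else:" || PySem.Str.startswith s "for " ||
   PySem.Str.startswith s "while " || PySem.Str.startswith s "try:" ||
   PySem.Str.startswith s "def " || PySem.Str.startswith s "class " ||
   PySem.Str.startswith s "with " || PySem.Str.startswith s "except" ||
   PySem.Str.startswith s "finally:")

def pvIndent (l : String) : Int := PySem.Str.len l - PySem.Str.len (PySem.Str.lstrip l)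

-- the insertion lines, in reversed (back-to-front) order as B appends them
def pvInsRev (stripped : String) (bi : Int) : List String :=
  if PySem.Str.startswith stripped "try:" then
    [pvSp (bi + 4) ++ "pass", pvSp bi ++ "except Exception as e:", pvSp (bi + 4) ++ "pass"]
  else
    [pvSp (bi + 4) ++ "pass"]

-- has_content: next_indent is not None and next_indent > block_indent
def pvHasC (ni : Option Int) (bi : Int) : Bool :=
  match ni with
  | some n => decide (bi < n)
  | none => false

-- one step of B's backward pass: state = (next non-blank indent, reversed output so far)
def pvStepB (st : Option Int × List String) (line : String) : Option Int × List String :=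
  let s := PySem.Str.strip line
  let out :=
    if pvIsHeader s then
      (if pvHasC st.1 (pvIndent line) then st.2 else st.2 ++ pvInsRev s (pvIndent line))
    else st.2
  let ni := if s = "" then st.1 else some (pvIndent line)
  (ni, out ++ [line])

def fix_incomplete_blocks_py_alt (content : String) : String :=
  let lines := (PySem.Str.split? content "\n").getD []
  let st := lines.reverse.foldl pvStepB (none, [])
  PySem.Str.join "\n" st.2.reverse

-- ===== PRECONDITION & SPEC =====
def Spec_fix_incomplete_blocks_py (content : String) (out : String) : Prop := out = fix_incomplete_blocks_py_alt content
instance (content : String) (out : String) : Decidable (Spec_fix_incomplete_blocks_py content out) := by unfold Spec_fix_incomplete_blocks_py; infer_instance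

-- ===== CLAIM (what is proved, stated in full; the proofs are below) =====
def Claim_equal_fix_incomplete_blocks_py : Prop := ∀ (content : String), Dom_fix_incomplete_blocks_py content → Spec_fix_incomplete_blocks_py content (fix_incomplete_blocks_py content)

-- ===== LEMMAS AND PROOFS =====

-- indent of the nearest non-blank line of a list (what B's next_indent tracks)
def pvNextIndent : List String → Option Int
  | [] => none
  | l :: rest => if PySem.Str.strip l = "" then pvNextIndent rest else some (pvIndent l)

-- A's lookahead loop only depends on the nearest non-blank indent
theorem pvLookA_eq (bi : Int) (rest : List String) :
    pvLookA bi rest = pvHasC (pvNextIndent rest) bi := by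
  induction rest with
  | nil => rfl
  | cons l t ih =>
    simp only [pvLookA, pvNextIndent]
    by_cases h : PySem.Str.strip l = ""
    · simp only [h, if_true, ih]
    · simp only [h, if_false]
      by_cases hlt : PySem.Str.len l - PySem.Str.len (PySem.Str.lstrip l) > bi
      · simp only [hlt, if_true, pvHasC, pvIndent]
        simp
      · simp only [hlt, if_false, pvHasC, pvIndent]
        simp

-- the common emission function: output for `lines` given the nearest non-blank indent `ni`
-- strictly after them
def pvEmit : List String → Option Int → List String
  | [], _ => []
  | line :: rest, ni =>
    let s := PySem.Str.strip line
    (if pvIsHeader s then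
      line ::
        (if pvHasC ((pvNextIndent rest).or ni) (pvIndent line) then []
         else (pvInsRev s (pvIndent line)).reverse)
     else [line]) ++ pvEmit rest ni

theorem pvFixA_eq_emit (lines : List String) : pvFixA lines = pvEmit lines none := by
  induction lines with
  | nil => rfl
  | cons line rest ih =>
    simp only [pvFixA, pvEmit, pvIsHeader, pvIndent, pvInsRev, pvLookA_eq, ih, Option.or_none]
    by_cases hh : (PySem.Str.endswith (PySem.Str.strip line) ":" &&
       (PySem.Str.startswith (PySem.Str.strip line) "if " || PySem.Str.startswith (PySem.Str.strip line) "elif " ||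
        PySem.Str.startswith (PySem.Str.strip line) "else:" || PySem.Str.startswith (PySem.Str.strip line) "for " ||
        PySem.Str.startswith (PySem.Str.strip line) "while " || PySem.Str.startswith (PySem.Str.strip line) "try:" ||
        PySem.Str.startswith (PySem.Str.strip line) "def " || PySem.Str.startswith (PySem.Str.strip line) "class " ||
        PySem.Str.startswith (PySem.Str.strip line) "with " || PySem.Str.startswith (PySem.Str.strip line) "except" ||
        PySem.Str.startswith (PySem.Str.strip line) "finally:")) = true
    · simp only [hh, if_true]
      cases hc : pvHasC (pvNextIndent rest) (PySem.Str.len line - PySem.Str.len (PySem.Str.lstrip line)) with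
      | true => simp
      | false =>
        simp only [Bool.not_false, if_true, Bool.false_eq_true, if_false]
        by_cases ht : PySem.Str.startswith (PySem.Str.strip line) "try:" = true
        · simp only [ht, if_true]
          rfl
        · simp only [ht, if_false]
          split_ifs <;> rfl
    · simp only [hh, if_false]; rfl

-- a header line is never blank (it ends with ':')
theorem pvIsHeader_ne_blank (l : String) (h : pvIsHeader (PySem.Str.strip l) = true) :
    ¬ PySem.Str.strip l = "" := by
  intro hs
  rw [hs] at h
  revert h
  decide

-- B's backward fold, characterised against pvEmit
theorem pvFoldB_eq (lines : List String) (ni : Option Int) (out : List String) :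
    lines.reverse.foldl pvStepB (ni, out)
      = ((pvNextIndent lines).or ni, out ++ (pvEmit lines ni).reverse) := by
  induction lines generalizing out with
  | nil => simp [pvEmit, pvNextIndent]
  | cons line rest ih =>
    simp only [List.reverse_cons, List.foldl_append, List.foldl_cons, List.foldl_nil, ih]
    simp only [pvStepB, pvEmit, pvNextIndent]
    by_cases hh : pvIsHeader (PySem.Str.strip line) = true
    · have hs := pvIsHeader_ne_blank line hh
      cases hc : pvHasC ((pvNextIndent rest).or ni) (pvIndent line) with
      | true => simp [hh, hs]
      | false => simp [hh, hs]
    · by_cases hs : PySem.Str.strip line = ""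
      · simp [hs, show pvIsHeader "" = false from by decide]
      · simp [hh, hs]

-- ===== VERDICT (by name: the statement is the Claim_ definition above) =====
theorem fix_incomplete_blocks_py_spec : Claim_equal_fix_incomplete_blocks_py := by
  intro content _
  show PySem.Str.join "\n" (pvFixA ((PySem.Str.split? content "\n").getD []))
      = PySem.Str.join "\n"
          (((PySem.Str.split? content "\n").getD []).reverse.foldl pvStepB (none, [])).2.reverse
  rw [pvFoldB_eq]
  simp [pvFixA_eq_emit]
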